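-- pv_equiv track=rewrite | github.com/Simplify141/2023AI | 实验课/Homework/hw3/hw3_21307335_lukezhou.py | retake
-- ===== SOURCE A (Python) =====
-- import copy
--
-- def retake(num, r, fullclause, selclause):
--     for temp in selclause:
--         for i in temp:
--             for rever in selclause:
--                 for j in rever:
--                     if i == '~'+j or j == '~'+i:
--                         book1 = copy.deepcopy(temp)
--                         temp2 = copy.deepcopy(rever)
--                         book1.remove(i)
--                         temp2.remove(j)
--                         temp2.extend(book1)
--                         fullclause.append(temp2)
--                         selclause.append(temp2)
--                         selclause.remove(temp)
--                         selclause.remove(rever)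
--                         num.append(num[-1]+1)
--                         r.append((fullclause.index(temp)+1,
--                                  fullclause.index(rever)+1))
--                         return True
--     return False
-- ===== SOURCE B (Python) =====
-- def retake(num, r, fullclause, selclause):
--     # Index each literal by its first (clause, position) occurrence, then for each
--     # literal look up its complement directly instead of rescanning all clause pairs.
--     first = {}
--     for ci, c in enumerate(selclause):
--         for li, lit in enumerate(c):
--             if lit not in first:
--                 first[lit] = (ci, li)
--     for temp in selclause:
--         for i in temp:
--             cands = []
--             p = first.get('~' + i)
--             if p is not None:
--                 cands.append((p, '~' + i))
--             if i.startswith('~'):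
--                 q = first.get(i[1:])
--                 if q is not None:
--                     cands.append((q, i[1:]))
--             if cands:
--                 (ci, li), j = min(cands)
--                 rever = selclause[ci]
--                 book1 = list(temp)
--                 temp2 = list(rever)
--                 book1.remove(i)
--                 temp2.remove(j)
--                 temp2.extend(book1)
--                 fullclause.append(temp2)
--                 selclause.append(temp2)
--                 selclause.remove(temp)
--                 selclause.remove(rever)
--                 num.append(num[-1] + 1)
--                 r.append((fullclause.index(temp) + 1,
--                           fullclause.index(rever) + 1))
--                 return True
--     return False
-- ===== Notes on version B (the rewrite author's own statement) =====
-- stated objective: faster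
-- what changed: B builds one literal -> first-occurrence index over selclause and looks each literal's complement up directly, replacing A's rescan of all clause pairs for every literal; on a hit it performs the same in-place mutations on the same clause pair and returns the same Boolean.
import Mathlib
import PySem

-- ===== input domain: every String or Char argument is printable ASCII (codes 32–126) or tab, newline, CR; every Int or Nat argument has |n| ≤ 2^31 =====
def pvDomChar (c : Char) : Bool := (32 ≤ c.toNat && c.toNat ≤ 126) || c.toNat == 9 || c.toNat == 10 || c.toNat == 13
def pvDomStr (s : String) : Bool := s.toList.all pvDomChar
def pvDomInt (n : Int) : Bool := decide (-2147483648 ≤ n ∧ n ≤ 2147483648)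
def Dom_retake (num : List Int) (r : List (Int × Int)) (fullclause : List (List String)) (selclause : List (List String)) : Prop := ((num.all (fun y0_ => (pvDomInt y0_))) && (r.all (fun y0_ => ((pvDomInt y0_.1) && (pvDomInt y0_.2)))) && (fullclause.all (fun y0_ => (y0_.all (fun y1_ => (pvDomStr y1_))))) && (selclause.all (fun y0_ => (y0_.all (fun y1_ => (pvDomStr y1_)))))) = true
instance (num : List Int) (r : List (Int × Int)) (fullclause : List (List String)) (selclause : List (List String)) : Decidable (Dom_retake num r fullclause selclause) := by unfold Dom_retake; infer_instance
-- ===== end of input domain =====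

-- B looks the complement of each literal up in a first-occurrence index built once (instead of A's
-- rescan of all clause pairs per literal); equivalence is about the RETURN VALUE only — on success
-- both Pythons perform the same in-place mutations of num/r/fullclause/selclause (not modelled here).

-- ===== PORT A =====
-- The mutation block of A always ends in 'return True' (its possible exceptions are excluded by
-- Pre_retake), so the returned value is exactly the early-exit quadruple scan, ported as nested `any`.
def retake (num : List Int) (r : List (Int × Int)) (fullclause : List (List String)) (selclause : List (List String)) : Bool :=
  selclause.any (fun temp => temp.any (fun i =>
    selclause.any (fun rever => rever.any (fun j =>
      i == "~" ++ j || j == "~" ++ i))))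

-- ===== PORT B =====
-- first-occurrence index: literal ↦ (clause index, position) for the first occurrence in selclause
def buildFirst (selclause : List (List String)) : PySem.Dict String (Int × Int) :=
  (PySem.List.enumerate selclause 0).foldl
    (fun d cc => (PySem.List.enumerate cc.2 0).foldl
      (fun d p => if d.contains p.2 then d else d.insert p.2 (cc.1, p.1)) d)
    PySem.Dict.empty

-- On a hit B's Python performs the same mutation block as A (same clauses temp/rever, same
-- literals i/j) and returns True; the returned value is the scan below ('cands' is nonempty
-- iff one of the two lookups hits).
def retake_alt (num : List Int) (r : List (Int × Int)) (fullclause : List (List String)) (selclause : List (List String)) : Bool :=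
  let first := buildFirst selclause
  selclause.any (fun temp => temp.any (fun i =>
    ((first.get? ("~" ++ i)).isSome) ||
    (PySem.Str.startswith i "~" && ((first.get? (PySem.Str.slice i (some 1) none)).isSome))))

-- ===== PRECONDITION & SPEC =====
-- pvHit sel t ii rv jj: positions (t,ii) and (rv,jj) in selclause hold complementary literals
-- (only used under the range bounds written in Pre_retake).
def pvHit (sel : List (List String)) (t ii rv jj : Nat) : Bool :=
  let i := (sel.getD t []).getD ii ""
  let j := (sel.getD rv []).getD jj ""
  i == "~" ++ j || j == "~" ++ i
-- lexicographic order of scan positions: A visits (t,ii,rv,jj) in this order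
def pvLex (t ii rv jj t' ii' rv' jj' : Nat) : Bool :=
  t < t' || (t == t' && (ii < ii' || (ii == ii' && (rv < rv' || (rv == rv' && jj ≤ jj')))))
-- pvSafe: at the first hit (t,ii,rv,jj) A's mutation block runs without an exception:
-- num[-1] needs num ≠ [], fullclause.index(temp)/index(rever) need the clause in fullclause
-- (or equal to the appended resolvent temp2), and the second selclause.remove needs rever
-- still present after temp was removed.
def pvSafe (num : List Int) (fc sel : List (List String)) (t ii rv jj : Nat) : Bool :=
  !num.isEmpty &&
  (fc.contains (sel.getD t []) || (((sel.getD rv []).erase ((sel.getD rv []).getD jj "")) ++ ((sel.getD t []).erase ((sel.getD t []).getD ii ""))) == (sel.getD t [])) &&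
  (fc.contains (sel.getD rv []) || (((sel.getD rv []).erase ((sel.getD rv []).getD jj "")) ++ ((sel.getD t []).erase ((sel.getD t []).getD ii ""))) == (sel.getD rv [])) &&
  (!((sel.getD t []) == (sel.getD rv [])) || (2 ≤ sel.count (sel.getD t []) || (((sel.getD rv []).erase ((sel.getD rv []).getD jj "")) ++ ((sel.getD t []).erase ((sel.getD t []).getD ii ""))) == (sel.getD rv [])))
-- Pre_retake excludes EXACTLY the inputs on which A raises: when the first complementary pair A's
-- scan finds is unsafe (IndexError on num[-1] with empty num, ValueError on fullclause.index when
-- that clause is missing from fullclause, or ValueError on the second selclause.remove when both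
-- literals lie in one clause without a duplicate); wherever A returns a value, Pre_retake holds.
def Pre_retake (num : List Int) (r : List (Int × Int)) (fullclause : List (List String)) (selclause : List (List String)) : Prop :=
  ((List.range selclause.length).all fun t =>
    (List.range (selclause.getD t []).length).all fun ii =>
      (List.range selclause.length).all fun rv =>
        (List.range (selclause.getD rv []).length).all fun jj =>
          !(pvHit selclause t ii rv jj) ||
          !((List.range selclause.length).all fun t' =>
              (List.range (selclause.getD t' []).length).all fun ii' =>
                (List.range selclause.length).all fun rv' =>
                  (List.range (selclause.getD rv' []).length).all fun jj' =>
                    !(pvHit selclause t' ii' rv' jj') || pvLex t ii rv jj t' ii' rv' jj') ||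
          pvSafe num fullclause selclause t ii rv jj) = true
instance (num : List Int) (r : List (Int × Int)) (fullclause : List (List String)) (selclause : List (List String)) : Decidable (Pre_retake num r fullclause selclause) := by unfold Pre_retake; infer_instance

def pvWitness_retake : List Int × (List (Int × Int)) × List (List String) × List (List String) :=
  ([1], [], [["p"], ["~p"], ["q"]], [["p"], ["~p"]])

def Spec_retake (num : List Int) (r : List (Int × Int)) (fullclause : List (List String)) (selclause : List (List String)) (out : Bool) : Prop := out = retake_alt num r fullclause selclause
instance (num : List Int) (r : List (Int × Int)) (fullclause : List (List String)) (selclause : List (List String)) (out : Bool) : Decidable (Spec_retake num r fullclause selclause out) := by unfold Spec_retake; infer_instance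

-- ===== CLAIM (what is proved, stated in full; the proofs are below) =====
def Claim_equal_retake : Prop := ∀ (num : List Int) (r : List (Int × Int)) (fullclause : List (List String)) (selclause : List (List String)), Dom_retake num r fullclause selclause → Pre_retake num r fullclause selclause → Spec_retake num r fullclause selclause (retake num r fullclause selclause)

-- ===== LEMMAS AND PROOFS =====

theorem get?_foldClause (c : List String) (s ci : Int) (d : PySem.Dict String (Int × Int)) (x : String) :
    ((((PySem.List.enumerate c s).foldl
        (fun d p => if d.contains p.2 then d else d.insert p.2 (ci, p.1)) d).get? x).isSome = true)
    ↔ ((d.get? x).isSome = true ∨ x ∈ c) := by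
  induction c generalizing s d with
  | nil => simp [PySem.List.enumerate_nil]
  | cons lit rest ih =>
    rw [PySem.List.enumerate_cons]
    simp only [List.foldl_cons, ih, List.mem_cons]
    by_cases hx : x = lit
    · subst hx
      by_cases hc : d.contains x = true
      · have h2 := hc
        rw [PySem.Dict.contains_eq_isSome_get?] at h2
        simp [hc, h2]
      · simp [hc, PySem.Dict.get?_insert_self]
    · by_cases hc : d.contains lit = true
      · simp [hc, hx]
      · simp [hc, PySem.Dict.get?_insert_of_ne _ _ hx, hx]

theorem get?_buildFirst_aux (sel : List (List String)) (s : Int) (d : PySem.Dict String (Int × Int)) (x : String) :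
    ((((PySem.List.enumerate sel s).foldl
        (fun d cc => (PySem.List.enumerate cc.2 0).foldl
          (fun d p => if d.contains p.2 then d else d.insert p.2 (cc.1, p.1)) d) d).get? x).isSome = true)
    ↔ ((d.get? x).isSome = true ∨ ∃ c ∈ sel, x ∈ c) := by
  induction sel generalizing s d with
  | nil => simp [PySem.List.enumerate_nil]
  | cons c rest ih =>
    rw [PySem.List.enumerate_cons]
    simp only [List.foldl_cons, ih, get?_foldClause, List.mem_cons]
    constructor
    · rintro ((h | h) | ⟨cl, hcl, hx⟩)
      · exact Or.inl h
      · exact Or.inr ⟨c, Or.inl rfl, h⟩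
      · exact Or.inr ⟨cl, Or.inr hcl, hx⟩
    · rintro (h | ⟨cl, (rfl | hcl), hx⟩)
      · exact Or.inl (Or.inl h)
      · exact Or.inl (Or.inr hx)
      · exact Or.inr ⟨cl, hcl, hx⟩

theorem get?_buildFirst (sel : List (List String)) (x : String) :
    (((buildFirst sel).get? x).isSome = true) ↔ ∃ c ∈ sel, x ∈ c := by
  unfold buildFirst
  rw [get?_buildFirst_aux]
  simp [PySem.Dict.get?_empty]

theorem eq_tilde_append_iff (i j : String) :
    i = "~" ++ j ↔ (PySem.Str.startswith i "~" = true ∧ PySem.Str.slice i (some 1) none = j) := by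
  constructor
  · rintro rfl
    constructor
    · simp [PySem.Str.startswith_eq, PySem.Chars.startswith_iff]
    · apply String.ext
      simp [PySem.Str.toList_slice, PySem.List.slice_from_one, String.toList_append]
  · rintro ⟨hs, hsl⟩
    simp only [PySem.Str.startswith_eq, PySem.Chars.startswith_iff] at hs
    apply String.ext
    have htl : i.toList = '~' :: i.toList.tail := by
      obtain ⟨t, ht⟩ := hs
      simp at ht
      rw [← ht]
      simp
    have : j.toList = i.toList.tail := by
      rw [← hsl]
      simp [PySem.Str.toList_slice, PySem.List.slice_from_one]
    have hgoal : ("~" ++ j).toList = '~' :: j.toList := by simp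
    rw [hgoal, this]
    exact htl

theorem inner_iff (sel : List (List String)) (i : String) :
    (∃ rever ∈ sel, ∃ j ∈ rever, i = "~" ++ j ∨ j = "~" ++ i) ↔
      ((∃ c ∈ sel, ("~" ++ i) ∈ c) ∨
        (PySem.Str.startswith i "~" = true ∧ ∃ c ∈ sel, (PySem.Str.slice i (some 1) none) ∈ c)) := by
  constructor
  · rintro ⟨rev, hrev, j, hj, hcase | hcase⟩
    · rcases (eq_tilde_append_iff i j).mp hcase with ⟨hs, hsl⟩
      exact Or.inr ⟨hs, rev, hrev, hsl ▸ hj⟩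
    · exact Or.inl ⟨rev, hrev, hcase ▸ hj⟩
  · rintro (⟨c, hc, hm⟩ | ⟨hs, c, hc, hm⟩)
    · exact ⟨c, hc, "~" ++ i, hm, Or.inr rfl⟩
    · exact ⟨c, hc, _, hm, Or.inl ((eq_tilde_append_iff i _).mpr ⟨hs, rfl⟩)⟩

theorem retake_eq_alt (num : List Int) (r : List (Int × Int)) (fullclause : List (List String)) (selclause : List (List String)) :
    retake num r fullclause selclause = retake_alt num r fullclause selclause := by
  unfold retake retake_alt
  rw [Bool.eq_iff_iff]
  simp only [List.any_eq_true, Bool.or_eq_true, Bool.and_eq_true, beq_iff_eq, get?_buildFirst]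
  constructor
  · rintro ⟨temp, htemp, i, hi, h⟩
    exact ⟨temp, htemp, i, hi, (inner_iff selclause i).mp ⟨h.choose, h.choose_spec.1, h.choose_spec.2⟩⟩
  · rintro ⟨temp, htemp, i, hi, h⟩
    exact ⟨temp, htemp, i, hi, (inner_iff selclause i).mpr h⟩

-- ===== VERDICT (by name: the statement is the Claim_ definition above) =====
theorem retake_spec : Claim_equal_retake := by
  intro num r fullclause selclause _ _
  unfold Spec_retake
  exact retake_eq_alt num r fullclause selclause
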